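-- pv_equiv track=rewrite | github.com/tuanna199/PGC | src/pgc/blastFiltRecord.py | combine_regions
-- ===== SOURCE A (Python) =====
-- import bisect
--
-- def point_index(region, points):
--     slicePoints = []
--     for point in points:
--         leftIndex = bisect.bisect_left(region, point)
--         rightIndex = bisect.bisect_right(region, point)
--         if leftIndex == 1 and rightIndex == 1:
--             slicePoints.append(point)
--     return slicePoints
--
-- def combine_regions(regions):
--     """
--     regions:
--     [(1, 167), (2, 160), (6, 166), (28, 107)]
--
--     return:
--     [(1, 2), (2, 6), (6, 28), (28, 107), (107, 160), (160, 166), (166, 167)]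
--     """
--     points = set()
--     for region in regions:
--         start, end = region
--         points.add(start)
--         points.add(end)
--
--     SliceSet = set()
--     pointList = sorted(list(points))
--     for region in regions:
--         start, end = region
--
--         slicePoints = point_index(region, pointList)
--
--         if slicePoints == []:
--             SliceSet.add((start, end))
--         else:
--             pointLen = len(slicePoints)
--             if pointLen == 1:
--                 SliceSet.add((start, slicePoints[0]))
--                 SliceSet.add((slicePoints[0], end))
--             else:
--                 for i in range(pointLen):
--                     point = slicePoints[i]
--                     if i == 0:
--                         SliceSet.add((start, slicePoints[0]))
--                     else:
--                         SliceSet.add((slicePoints[i-1], slicePoints[i]))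
--                 SliceSet.add((slicePoints[i], end))
--     return sorted(list(SliceSet))
-- ===== SOURCE B (Python) =====
-- import bisect
--
-- def combine_regions(regions):
--     pts = sorted({c for r in regions for c in r})
--     pieces = set()
--     for s, e in regions:
--         lo = bisect.bisect_right(pts, s)
--         hi = bisect.bisect_left(pts, e)
--         inner = pts[lo:hi]
--         for pair in zip([s] + inner, inner + [e]):
--             pieces.add(pair)
--     return sorted(pieces)
-- ===== Notes on version B (the rewrite author's own statement) =====
-- stated objective: faster
-- what changed: Instead of testing every sorted endpoint against each region with two bisects into the region pair, B binary-searches the sorted endpoint list once per region to slice out its interior points and emits the sub-intervals by zipping adjacent points.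
import Mathlib
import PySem

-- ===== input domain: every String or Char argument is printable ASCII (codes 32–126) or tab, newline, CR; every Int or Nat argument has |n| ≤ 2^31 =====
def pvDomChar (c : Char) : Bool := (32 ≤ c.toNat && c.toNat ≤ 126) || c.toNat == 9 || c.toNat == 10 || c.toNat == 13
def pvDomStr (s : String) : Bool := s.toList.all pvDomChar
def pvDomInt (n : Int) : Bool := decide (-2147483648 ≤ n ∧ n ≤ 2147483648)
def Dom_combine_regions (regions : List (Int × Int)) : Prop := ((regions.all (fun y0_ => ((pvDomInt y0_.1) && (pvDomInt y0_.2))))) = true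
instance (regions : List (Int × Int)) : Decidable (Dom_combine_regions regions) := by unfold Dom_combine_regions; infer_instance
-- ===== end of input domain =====

-- B splits each region at its interior endpoints found by two binary searches into the
-- sorted endpoint list (a slice), instead of A's per-region scan of every endpoint.

-- ===== PORT A =====
-- Python's bisect_left/bisect_right on the region TUPLE is bisect on the 2-element sequence
-- [region[0], region[1]]: ported exactly with PySem.List.bisectLeft/bisectRight.
def point_index (region : Int × Int) (points : List Int) : List Int :=
  points.foldl
    (fun slicePoints point =>
      let leftIndex := PySem.List.bisectLeft [region.1, region.2] point
      let rightIndex := PySem.List.bisectRight [region.1, region.2] point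
      if leftIndex == 1 && rightIndex == 1 then slicePoints ++ [point] else slicePoints)
    []

def combine_regions (regions : List (Int × Int)) : List (Int × Int) :=
  let points : PySem.Set Int :=
    regions.foldl (fun s r => PySem.Set.add (PySem.Set.add s r.1) r.2) PySem.Set.empty
  let pointList : List Int := PySem.List.sorted points (fun x => x)
  let sliceSet : PySem.Set (Int × Int) :=
    regions.foldl
      (fun acc r =>
        let slicePoints := point_index r pointList
        if slicePoints == ([] : List Int) then PySem.Set.add acc (r.1, r.2)
        else
          let pointLen := PySem.List.len slicePoints
          if pointLen == 1 then
            PySem.Set.add (PySem.Set.add acc (r.1, PySem.List.pyGetD slicePoints 0 0))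
              (PySem.List.pyGetD slicePoints 0 0, r.2)
          else
            let acc2 :=
              (PySem.List.pyRange 0 pointLen 1).foldl
                (fun a i =>
                  if i == 0 then PySem.Set.add a (r.1, PySem.List.pyGetD slicePoints 0 0)
                  else
                    PySem.Set.add a
                      (PySem.List.pyGetD slicePoints (i - 1) 0, PySem.List.pyGetD slicePoints i 0))
                acc
            -- Python's leftover loop variable i equals pointLen - 1 here
            PySem.Set.add acc2 (PySem.List.pyGetD slicePoints (pointLen - 1) 0, r.2))
      PySem.Set.empty
  PySem.List.sorted2 sliceSet (fun p => p.1) (fun p => p.2)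

-- ===== PORT B =====
def combine_regions_alt (regions : List (Int × Int)) : List (Int × Int) :=
  let pts : PySem.Set Int :=
    regions.foldl (fun s r => PySem.Set.add (PySem.Set.add s r.1) r.2) PySem.Set.empty
  let ptsL : List Int := PySem.List.sorted pts (fun x => x)
  let pieces : PySem.Set (Int × Int) :=
    regions.foldl
      (fun acc r =>
        let lo := PySem.List.bisectRight ptsL r.1
        let hi := PySem.List.bisectLeft ptsL r.2
        let inner := PySem.List.slice ptsL (some (lo : Int)) (some (hi : Int))
        (List.zip (r.1 :: inner) (inner ++ [r.2])).foldl (fun a pr => PySem.Set.add a pr) acc)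
      PySem.Set.empty
  PySem.List.sorted2 pieces (fun p => p.1) (fun p => p.2)

-- ===== PRECONDITION & SPEC =====
def Spec_combine_regions (regions : List (Int × Int)) (out : List (Int × Int)) : Prop := out = combine_regions_alt regions
instance (regions : List (Int × Int)) (out : List (Int × Int)) : Decidable (Spec_combine_regions regions out) := by unfold Spec_combine_regions; infer_instance

-- ===== CLAIM (what is proved, stated in full; the proofs are below) =====
def Claim_equal_combine_regions : Prop := ∀ (regions : List (Int × Int)), Dom_combine_regions regions → Spec_combine_regions regions (combine_regions regions)

-- ===== LEMMAS AND PROOFS =====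

-- bisect_left on the 2-element sequence [s, e], closed form
theorem bl2 (s e x : Int) :
    PySem.List.bisectLeft [s, e] x = if e < x then 2 else if s < x then 1 else 0 := by
  by_cases h1 : e < x <;> by_cases h2 : s < x <;>
    simp [PySem.List.bisectLeft, PySem.List.bisectLeftLoop, h1, h2]

-- bisect_right on the 2-element sequence [s, e], closed form
theorem br2 (s e x : Int) :
    PySem.List.bisectRight [s, e] x = if x < e then (if x < s then 0 else 1) else 2 := by
  by_cases h1 : x < e <;> by_cases h2 : x < s <;>
    simp [PySem.List.bisectRight, PySem.List.bisectRightLoop, h1, h2]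

theorem point_index_eq_filter (s e : Int) (pts : List Int) :
    point_index (s, e) pts = pts.filter (fun p => decide (s < p) && decide (p < e)) := by
  unfold point_index
  rw [PySem.List.foldl_append_if_eq_filter
      (fun point => PySem.List.bisectLeft [s, e] point == 1 &&
        PySem.List.bisectRight [s, e] point == 1) pts []]
  rw [List.nil_append]
  apply List.filter_congr
  intro x _
  rw [bl2, br2]
  by_cases h1 : e < x <;> by_cases h2 : s < x <;> by_cases h3 : x < e <;> by_cases h4 : x < s <;>
    simp [h1, h2, h3, h4] <;> omega

-- a clamped drop/take window equals a filter when the predicate holds exactly on the window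
theorem drop_take_eq_filter (l : List Int) (lo hi : Nat) (P : Int → Bool)
    (h : ∀ j (hj : j < l.length), (P l[j] = true ↔ (lo ≤ j ∧ j < hi))) :
    (l.drop lo).take (hi - lo) = l.filter P := by
  induction l generalizing lo hi with
  | nil => simp
  | cons a t ih =>
    have ha := h 0 (by simp)
    simp only [List.getElem_cons_zero] at ha
    have ht : ∀ (lo' hi' : Nat),
        (∀ j, j + 1 < (a :: t).length → ((lo' + 1 ≤ j + 1 ∧ j + 1 < hi' + 1) ↔ (lo' ≤ j ∧ j < hi'))) := by
      intro lo' hi' j _; omega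
    cases lo with
    | zero =>
      cases hi with
      | zero =>
        have hPa : P a = false := by
          rw [Bool.eq_false_iff]; intro hc; have := ha.mp hc; omega
        have := ih 0 0 (fun j hj => by
          have := h (j + 1) (by simpa using Nat.succ_lt_succ hj)
          simp only [List.getElem_cons_succ] at this
          constructor
          · intro hp; exact absurd (this.mp hp).2 (by omega)
          · intro hp; omega)
        simp only [Nat.sub_self, List.take_zero] at this ⊢
        simp [hPa, ← this]
      | succ k =>
        have hPa : P a = true := ha.mpr (by omega)
        have ihs := ih 0 k (fun j hj => by
          have := h (j + 1) (by simpa using Nat.succ_lt_succ hj)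
          simp only [List.getElem_cons_succ] at this
          constructor
          · intro hp; have := this.mp hp; omega
          · intro hp; exact this.mpr (by omega))
        simp only [List.drop_zero] at ihs ⊢
        simp [hPa, List.take_succ_cons, ← ihs]
    | succ m =>
      have hPa : P a = false := by
        rw [Bool.eq_false_iff]; intro hc; have := ha.mp hc; omega
      have ihs := ih m (hi - 1) (fun j hj => by
        have := h (j + 1) (by simpa using Nat.succ_lt_succ hj)
        simp only [List.getElem_cons_succ] at this
        constructor
        · intro hp; have := this.mp hp; omega
        · intro hp; exact this.mpr (by omega))
      simp only [List.drop_succ_cons]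
      rw [List.filter_cons, if_neg (by simp [hPa])]
      rw [← ihs]
      congr 1
      omega

-- B's slice of the sorted point list is the interior-points filter
theorem slice_eq_filter (pts : List Int) (hso : pts.Pairwise (· ≤ ·)) (s e : Int) :
    PySem.List.slice pts (some ((PySem.List.bisectRight pts s : Nat) : Int))
        (some ((PySem.List.bisectLeft pts e : Nat) : Int))
      = pts.filter (fun p => decide (s < p) && decide (p < e)) := by
  obtain ⟨hrle, hrlt, hrge⟩ := PySem.List.bisectRight_spec pts s hso
  obtain ⟨hlle, hllt, hlge⟩ := PySem.List.bisectLeft_spec pts e hso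
  rw [PySem.List.slice_natCast]
  apply drop_take_eq_filter
  intro j hj
  simp only [Bool.and_eq_true, decide_eq_true_eq]
  constructor
  · rintro ⟨h1, h2⟩
    constructor
    · by_contra hc
      have := hrlt j hj (by omega)
      omega
    · by_contra hc
      have := hlge j hj (by omega)
      omega
  · rintro ⟨h1, h2⟩
    exact ⟨by have := hrge j hj h1; omega, by have := hllt j hj h2; omega⟩

-- the Nat-indexed splitting loop of A, for a nonempty interior list, is the adjacent-pairs fold
theorem loop_nat (l : List Int) (hl : l ≠ []) :
    ∀ (s e : Int) (acc : PySem.Set (Int × Int)),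
    PySem.Set.add
      ((List.range l.length).foldl
        (fun a k =>
          if k = 0 then PySem.Set.add a (s, l.getD 0 0)
          else PySem.Set.add a (l.getD (k - 1) 0, l.getD k 0))
        acc)
      (l.getD (l.length - 1) 0, e)
    = (List.zip (s :: l) (l ++ [e])).foldl PySem.Set.add acc := by
  induction l with
  | nil => exact absurd rfl hl
  | cons p t ih =>
    intro s e acc
    cases t with
    | nil => simp [List.range_succ]
    | cons q u =>
      have hne : q :: u ≠ [] := by simp
      have step : (List.range (p :: q :: u).length).foldl
          (fun a k =>
            if k = 0 then PySem.Set.add a (s, (p :: q :: u).getD 0 0)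
            else PySem.Set.add a ((p :: q :: u).getD (k - 1) 0, (p :: q :: u).getD k 0))
          acc
          = (List.range (q :: u).length).foldl
            (fun a k =>
              if k = 0 then PySem.Set.add a (p, (q :: u).getD 0 0)
              else PySem.Set.add a ((q :: u).getD (k - 1) 0, (q :: u).getD k 0))
            (PySem.Set.add acc (s, p)) := by
        rw [show (p :: q :: u).length = (q :: u).length + 1 from rfl, List.range_succ_eq_map,
          List.foldl_cons, List.foldl_map]
        simp only [List.getD_cons_zero]
        apply PySem.List.foldl_congr_mem
        intro a k _
        cases k with
        | zero => simp
        | succ j => simp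
      have hlast : (p :: q :: u).getD ((p :: q :: u).length - 1) 0
          = (q :: u).getD ((q :: u).length - 1) 0 := by
        simp
        rfl
      rw [step, hlast]
      have := ih hne p e (PySem.Set.add acc (s, p))
      rw [this]
      rfl

-- A's per-region branch structure over the interior list equals B's zip fold
theorem step_eq (s e : Int) (l : List Int) (acc : PySem.Set (Int × Int)) :
    (if l == ([] : List Int) then PySem.Set.add acc (s, e)
     else if PySem.List.len l == 1 then
       PySem.Set.add (PySem.Set.add acc (s, PySem.List.pyGetD l 0 0)) (PySem.List.pyGetD l 0 0, e)
     else
       PySem.Set.add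
         ((PySem.List.pyRange 0 (PySem.List.len l) 1).foldl
           (fun a i =>
             if i == 0 then PySem.Set.add a (s, PySem.List.pyGetD l 0 0)
             else PySem.Set.add a (PySem.List.pyGetD l (i - 1) 0, PySem.List.pyGetD l i 0))
           acc)
         (PySem.List.pyGetD l (PySem.List.len l - 1) 0, e))
    = (List.zip (s :: l) (l ++ [e])).foldl (fun a pr => PySem.Set.add a pr) acc := by
  match l with
  | [] => simp
  | [p] => simp [PySem.List.len]
  | p :: q :: t =>
    rw [if_neg (by simp), if_neg (by simp [PySem.List.len]; omega)]
    have hlen : PySem.List.len (p :: q :: t) = ((p :: q :: t).length : Int) := by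
      simp [PySem.List.len]
    rw [hlen]
    rw [PySem.List.pyRange_zero_nat, List.foldl_map]
    have hbody : (List.range (p :: q :: t).length).foldl
        (fun a (k : Nat) =>
          if (k : Int) == 0 then PySem.Set.add a (s, PySem.List.pyGetD (p :: q :: t) 0 0)
          else PySem.Set.add a
            (PySem.List.pyGetD (p :: q :: t) ((k : Int) - 1) 0,
             PySem.List.pyGetD (p :: q :: t) (k : Int) 0))
        acc
        = (List.range (p :: q :: t).length).foldl
          (fun a k =>
            if k = 0 then PySem.Set.add a (s, (p :: q :: t).getD 0 0)
            else PySem.Set.add a ((p :: q :: t).getD (k - 1) 0, (p :: q :: t).getD k 0))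
          acc := by
      apply PySem.List.foldl_congr_mem
      intro a k _
      cases k with
      | zero => simp
      | succ j =>
        rw [if_neg (by simp; omega)]
        rw [if_neg (by omega)]
        have h1 : (((j + 1 : Nat) : Int)) - 1 = ((j : Nat) : Int) := by push_cast; ring
        rw [h1, PySem.List.pyGetD_natCast, PySem.List.pyGetD_natCast]
        simp
    rw [hbody]
    have hlast : PySem.List.pyGetD (p :: q :: t) (((p :: q :: t).length : Int) - 1) 0
        = (p :: q :: t).getD ((p :: q :: t).length - 1) 0 := by
      rw [show (((p :: q :: t).length : Int) - 1) = (((p :: q :: t).length - 1 : Nat) : Int) by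
        push_cast [List.length_cons]; omega]
      rw [PySem.List.pyGetD_natCast]
    rw [hlast]
    exact loop_nat (p :: q :: t) (by simp) s e acc

-- ===== VERDICT (by name: the statement is the Claim_ definition above) =====
theorem combine_regions_spec : Claim_equal_combine_regions := by
  intro regions _
  unfold Spec_combine_regions combine_regions combine_regions_alt
  simp only []
  congr 1
  apply PySem.List.foldl_congr_mem
  intro acc r _
  obtain ⟨s, e⟩ := r
  have hso : (PySem.List.sorted
      (regions.foldl (fun s r => PySem.Set.add (PySem.Set.add s r.1) r.2) PySem.Set.empty)
      (fun x => x)).Pairwise (· ≤ ·) := by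
    simpa using PySem.List.sorted_pairwise
      (regions.foldl (fun s r => PySem.Set.add (PySem.Set.add s r.1) r.2) PySem.Set.empty)
      (fun x => x)
  rw [point_index_eq_filter, slice_eq_filter _ hso]
  exact step_eq s e _ acc
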